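-- pv_equiv track=rewrite | github.com/Rethy729/Rosalind_Bioinformatics_Stronghold | ORF/ORF.py | possible_protein
-- ===== SOURCE A (Python) =====
-- def possible_protein(ORFlist):
--     protein_set = set()
--     for frame in ORFlist:
--         start = []
--         end = []
--         for i in range(len(frame)):
--             if frame[i] == 'M':
--                 start.append(i)
--             if frame[i] == 'X':
--                 end.append(i)
--         if len(start) ==0 or len(end) ==0:
--             continue
--
--         for i in range(len(start)):
--             for j in range(len(end)):
--                 if start[i]<end[j]:
--                     protein_set.add(frame[start[i]:end[j]])
--                     break
--     return protein_set
-- ===== SOURCE B (Python) =====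
-- def possible_protein(ORFlist):
--     # One pass per frame: pending 'M' starts are all closed by the first 'X' seen after them.
--     protein_set = set()
--     for frame in ORFlist:
--         pending = []
--         for i, c in enumerate(frame):
--             if c == 'M':
--                 pending.append(i)
--             elif c == 'X':
--                 for s in pending:
--                     protein_set.add(frame[s:i])
--                 pending = []
--     return protein_set
-- ===== Notes on version B (the rewrite author's own statement) =====
-- stated objective: alternative
-- what changed: Replaced the per-frame start-index x end-index nested scan (first stop found by a linear inner loop per start) with a single left-to-right pass that keeps the pending 'M' starts and flushes them all at each 'X', so the per-start inner scan over end positions disappears; intended as asymptotically better (O(n) vs O(S*E) per frame), a timing run measured ~1.6x at the largest size but did not consistently confirm >=1.5x.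
import Mathlib
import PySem

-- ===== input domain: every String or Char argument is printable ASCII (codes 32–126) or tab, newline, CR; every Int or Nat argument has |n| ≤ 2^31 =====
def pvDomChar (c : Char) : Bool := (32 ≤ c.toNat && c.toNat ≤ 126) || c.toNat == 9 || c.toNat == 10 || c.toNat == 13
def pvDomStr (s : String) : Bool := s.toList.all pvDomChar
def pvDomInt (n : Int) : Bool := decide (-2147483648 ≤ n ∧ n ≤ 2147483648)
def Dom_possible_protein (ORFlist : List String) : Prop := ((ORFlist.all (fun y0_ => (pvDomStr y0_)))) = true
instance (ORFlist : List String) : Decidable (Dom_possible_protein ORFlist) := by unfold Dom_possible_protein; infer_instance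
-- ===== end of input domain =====

-- B replaces the per-frame nested start x end scan by one pass that flushes pending M-starts at each X (objective: alternative; O(n) per frame vs A's per-start end-scan, measured ~1.6x at the largest size but not consistently confirmed).


-- ===== PORT A =====
-- helper: the index loop body collecting M-positions (start) and X-positions (end)
def pvCollect (frame : String) (se : List Int × List Int) (i : Int) : List Int × List Int :=
  let se1 := if PySem.Str.pyGet? frame i = some 'M' then (se.1 ++ [i], se.2) else se
  if PySem.Str.pyGet? frame i = some 'X' then (se1.1, se1.2 ++ [i]) else se1

-- helper: the inner 'for j ... if start[i] < end[j]: add; break' loop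
def pvInner (frame : String) (s : Int) : List Int → PySem.Set String → PySem.Set String
  | [], ps => ps
  | e :: rest, ps =>
      if s < e then PySem.Set.add ps (PySem.Str.slice frame (some s) (some e))
      else pvInner frame s rest ps

-- helper: the body of A's 'for frame in ORFlist' loop
def pvStepA (protein_set : PySem.Set String) (frame : String) : PySem.Set String :=
  let se := (PySem.List.pyRange 0 (PySem.Str.len frame) 1).foldl (pvCollect frame) ([], [])
  if se.1.length = 0 ∨ se.2.length = 0 then protein_set
  else se.1.foldl (fun ps s => pvInner frame s se.2 ps) protein_set

def possible_protein (ORFlist : List String) : List String :=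
  ORFlist.foldl pvStepA PySem.Set.empty

-- ===== PORT B =====
-- helper: flush the pending starts against the stop at index i
def pvFlush (frame : String) (i : Int) (pend : List Int) (ps : PySem.Set String) :
    PySem.Set String :=
  pend.foldl (fun ps s => PySem.Set.add ps (PySem.Str.slice frame (some s) (some i))) ps

-- helper: the body of B's 'for i, c in enumerate(frame)' loop
def pvScanB (frame : String) (st : List Int × PySem.Set String) (ic : Int × Char) :
    List Int × PySem.Set String :=
  if ic.2 = 'M' then (st.1 ++ [ic.1], st.2)
  else if ic.2 = 'X' then ([], pvFlush frame ic.1 st.1 st.2)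
  else st

-- helper: the body of B's 'for frame in ORFlist' loop
def pvStepB (protein_set : PySem.Set String) (frame : String) : PySem.Set String :=
  ((PySem.List.enumerate frame.toList).foldl (pvScanB frame) ([], protein_set)).2

def possible_protein_alt (ORFlist : List String) : List String :=
  ORFlist.foldl pvStepB PySem.Set.empty

-- ===== PRECONDITION & SPEC =====
def Spec_possible_protein (ORFlist : List String) (out : List String) : Prop := out = possible_protein_alt ORFlist
instance (ORFlist : List String) (out : List String) : Decidable (Spec_possible_protein ORFlist out) := by unfold Spec_possible_protein; infer_instance

-- ===== CLAIM (what is proved, stated in full; the proofs are below) =====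
def Claim_equal_possible_protein : Prop := ∀ (ORFlist : List String), Dom_possible_protein ORFlist → Spec_possible_protein ORFlist (possible_protein ORFlist)

-- ===== LEMMAS AND PROOFS =====

-- positions (absolute, starting at offset i) of 'M' / 'X' in a char list
def startsOf : List Char → Int → List Int
  | [], _ => []
  | c :: cs, i => (if c = 'M' then [i] else []) ++ startsOf cs (i + 1)

def endsOf : List Char → Int → List Int
  | [], _ => []
  | c :: cs, i => (if c = 'X' then [i] else []) ++ endsOf cs (i + 1)

-- the (start, first stop after it) pairs produced by B's flushing scan
def pairsAux : List Char → Int → List Int → List (Int × Int)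
  | [], _, _ => []
  | c :: cs, i, pend =>
      if c = 'M' then pairsAux cs (i + 1) (pend ++ [i])
      else if c = 'X' then pend.map (fun s => (s, i)) ++ pairsAux cs (i + 1) []
      else pairsAux cs (i + 1) pend

def pvPairFold (frame : String) (ps : PySem.Set String) (l : List (Int × Int)) :
    PySem.Set String :=
  l.foldl (fun ps p => PySem.Set.add ps (PySem.Str.slice frame (some p.1) (some p.2))) ps

def pvPairsOf (ends : List Int) (starts : List Int) : List (Int × Int) :=
  starts.filterMap (fun s => (ends.find? (fun e => s < e)).map (fun e => (s, e)))

theorem filterMap_all_some {α β : Type} (l : List α) (f : α → Option β) (g : α → β)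
    (h : ∀ x ∈ l, f x = some (g x)) : l.filterMap f = l.map g := by
  induction l with
  | nil => rfl
  | cons x xs ih =>
      simp only [List.filterMap_cons, h x (by simp), List.map_cons]
      rw [ih (fun y hy => h y (by simp [hy]))]

theorem filterMap_ext {α β : Type} (l : List α) (f g : α → Option β)
    (h : ∀ x ∈ l, f x = g x) : l.filterMap f = l.filterMap g := by
  induction l with
  | nil => rfl
  | cons x xs ih =>
      simp only [List.filterMap_cons, h x (by simp)]
      rw [ih (fun y hy => h y (by simp [hy]))]

theorem mem_startsOf_le : ∀ (cs : List Char) (i s : Int), s ∈ startsOf cs i → i ≤ s := by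
  intro cs
  induction cs with
  | nil => intro i s h; simp [startsOf] at h
  | cons c cs ih =>
      intro i s h
      simp only [startsOf, List.mem_append] at h
      rcases h with h | h
      · split at h <;> simp_all
      · have := ih (i + 1) s h; omega

-- A's inner loop with break = first end greater than s
theorem pvInner_eq_find (frame : String) (s : Int) :
    ∀ (ends : List Int) (ps : PySem.Set String),
      pvInner frame s ends ps =
        match ends.find? (fun e => s < e) with
        | some e => PySem.Set.add ps (PySem.Str.slice frame (some s) (some e))
        | none => ps := by
  intro ends
  induction ends with
  | nil => intro ps; simp [pvInner]
  | cons e rest ih =>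
      intro ps
      by_cases h : s < e
      · simp [pvInner, List.find?, h]
      · simp [pvInner, List.find?, h, ih]

-- A's outer loop = fold of adds over the (start, first stop) pairs
theorem foldl_pvInner_eq (frame : String) (ends : List Int) :
    ∀ (starts : List Int) (ps : PySem.Set String),
      starts.foldl (fun ps s => pvInner frame s ends ps) ps =
        pvPairFold frame ps (pvPairsOf ends starts) := by
  intro starts
  induction starts with
  | nil => intro ps; simp [pvPairFold, pvPairsOf]
  | cons s rest ih =>
      intro ps
      simp only [List.foldl_cons, pvPairsOf, List.filterMap_cons]
      rw [pvInner_eq_find]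
      cases h : (List.find? (fun e => decide (s < e)) ends) with
      | none => simp [ih, pvPairsOf]
      | some e => simp [ih, pvPairsOf, pvPairFold]

-- B's flushing scan produces exactly the (start, first stop after it) pairs
theorem pairsAux_eq : ∀ (cs : List Char) (i : Int) (pend : List Int),
    (∀ s ∈ pend, s < i) →
    pairsAux cs i pend = pvPairsOf (endsOf cs i) (pend ++ startsOf cs i) := by
  intro cs
  induction cs with
  | nil =>
      intro i pend _
      simp [pairsAux, startsOf, endsOf, pvPairsOf]
  | cons c cs ih =>
      intro i pend hp
      by_cases hM : c = 'M'
      · subst hM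
        have hp' : ∀ s ∈ pend ++ [i], s < i + 1 := by
          intro s hs
          rcases List.mem_append.1 hs with h | h
          · have := hp s h; omega
          · simp at h; omega
        rw [show pairsAux ('M' :: cs) i pend = pairsAux cs (i + 1) (pend ++ [i]) from by
              simp [pairsAux],
            ih (i + 1) (pend ++ [i]) hp']
        simp [startsOf, endsOf, pvPairsOf, List.append_assoc]
      · by_cases hX : c = 'X'
        · subst hX
          rw [show pairsAux ('X' :: cs) i pend
                = pend.map (fun s => (s, i)) ++ pairsAux cs (i + 1) [] from by simp [pairsAux],
              ih (i + 1) [] (by simp)]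
          have hE : endsOf ('X' :: cs) i = i :: endsOf cs (i + 1) := by simp [endsOf]
          have hS : startsOf ('X' :: cs) i = startsOf cs (i + 1) := by simp [startsOf]
          rw [hE, hS, List.nil_append]
          simp only [pvPairsOf, List.filterMap_append]
          have h1 : pend.filterMap
              (fun s => ((List.find? (fun e => decide (s < e)) (i :: endsOf cs (i + 1))).map
                (fun e => (s, e)))) = pend.map (fun s => (s, i)) := by
            apply filterMap_all_some
            intro s hs
            have : s < i := hp s hs
            simp [List.find?, this]
          have h2 : (startsOf cs (i + 1)).filterMap
              (fun s => ((List.find? (fun e => decide (s < e)) (i :: endsOf cs (i + 1))).map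
                (fun e => (s, e))))
              = (startsOf cs (i + 1)).filterMap
              (fun s => ((List.find? (fun e => decide (s < e)) (endsOf cs (i + 1))).map
                (fun e => (s, e)))) := by
            apply filterMap_ext
            intro s hs
            have hle : i + 1 ≤ s := mem_startsOf_le cs (i + 1) s hs
            have : ¬ (s < i) := by omega
            simp [List.find?, this]
          rw [h1, h2]
        · rw [show pairsAux (c :: cs) i pend = pairsAux cs (i + 1) pend from by
                simp [pairsAux, hM, hX],
              ih (i + 1) pend (fun s hs => by have := hp s hs; omega)]
          simp [startsOf, endsOf, hM, hX]

-- B's per-frame fold, arbitrary offset and pending list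
theorem altScan_eq (frame : String) : ∀ (cs : List Char) (k : Int) (pend : List Int)
    (ps : PySem.Set String),
    ((PySem.List.enumerate cs k).foldl (pvScanB frame) (pend, ps)).2
      = pvPairFold frame ps (pairsAux cs k pend) := by
  intro cs
  induction cs with
  | nil => intro k pend ps; simp [PySem.List.enumerate_nil, pairsAux, pvPairFold]
  | cons c cs ih =>
      intro k pend ps
      rw [PySem.List.enumerate_cons, List.foldl_cons]
      by_cases hM : c = 'M'
      · subst hM
        rw [show pvScanB frame (pend, ps) (k, 'M') = (pend ++ [k], ps) from by simp [pvScanB]]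
        rw [ih (k + 1) (pend ++ [k]) ps]
        simp [pairsAux]
      · by_cases hX : c = 'X'
        · subst hX
          rw [show pvScanB frame (pend, ps) (k, 'X') = ([], pvFlush frame k pend ps) from by
                simp [pvScanB]]
          rw [ih (k + 1) [] (pvFlush frame k pend ps)]
          rw [show pairsAux ('X' :: cs) k pend
                = pend.map (fun s => (s, k)) ++ pairsAux cs (k + 1) [] from by simp [pairsAux]]
          simp only [pvPairFold, List.foldl_append, List.foldl_map]
          rfl
        · rw [show pvScanB frame (pend, ps) (k, c) = (pend, ps) from by simp [pvScanB, hM, hX]]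
          rw [ih (k + 1) pend ps]
          simp [pairsAux, hM, hX]

-- A's index scan collects exactly the M- and X-positions
theorem scan_eq (frame : String) : ∀ (suf pre : List Char) (s e : List Int),
    frame.toList = pre ++ suf →
    (PySem.List.pyRange (pre.length : Int) (frame.toList.length : Int) 1).foldl
      (pvCollect frame) (s, e)
    = (s ++ startsOf suf (pre.length : Int), e ++ endsOf suf (pre.length : Int)) := by
  intro suf
  induction suf with
  | nil =>
      intro pre s e h
      have hlen : frame.toList.length = pre.length := by simp [h]
      rw [hlen, show PySem.List.pyRange ((pre.length : Nat) : Int) ((pre.length : Nat) : Int)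
            = [] from by simp [pysem]]
      simp [startsOf, endsOf]
  | cons c cs ih =>
      intro pre s e h
      have hlt : (pre.length : Int) < (frame.toList.length : Int) := by
        simp [h]
      rw [PySem.List.pyRange_one_cons hlt, List.foldl_cons]
      have hget : PySem.Str.pyGet? frame (pre.length : Int) = some c := by
        rw [PySem.Str.pyGet?_natCast, h]
        simp
      have hstep : pvCollect frame (s, e) (pre.length : Int)
          = (s ++ (if c = 'M' then [(pre.length : Int)] else []),
             e ++ (if c = 'X' then [(pre.length : Int)] else [])) := by
        simp only [pvCollect, hget, Option.some.injEq]
        by_cases hM : c = 'M'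
        · subst hM; simp
        · by_cases hX : c = 'X'
          · subst hX; simp [hM]
          · simp [hM, hX]
      rw [hstep]
      have hnext : ((pre.length : Int) + 1) = (((pre ++ [c]).length : Nat) : Int) := by
        simp
      rw [hnext, ih (pre ++ [c]) _ _ (by simp [h])]
      simp [startsOf, endsOf, List.append_assoc]

-- no pairs when there are no starts or no ends
theorem pvPairsOf_nil_ends (starts : List Int) : pvPairsOf [] starts = [] := by
  simp [pvPairsOf]

-- the per-frame steps of A and B coincide
theorem step_eq (ps : PySem.Set String) (frame : String) :
    pvStepA ps frame = pvStepB ps frame := by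
  have hscan := scan_eq frame frame.toList [] [] [] (by simp)
  simp only [List.length_nil, Nat.cast_zero, List.nil_append] at hscan
  rw [pvStepA, pvStepB, altScan_eq frame frame.toList 0 [] ps,
      pairsAux_eq frame.toList 0 [] (by simp)]
  rw [show PySem.Str.len frame = (frame.toList.length : Int) from by simp [PySem.Str.len_eq]]
  rw [hscan]
  simp only [List.nil_append]
  by_cases h1 : startsOf frame.toList 0 = []
  · simp [h1, pvPairsOf, pvPairFold]
  · by_cases h2 : endsOf frame.toList 0 = []
    · simp [h1, h2, pvPairsOf_nil_ends, pvPairFold]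
    · rw [if_neg (by simp [List.length_eq_zero_iff, h1, h2])]
      rw [foldl_pvInner_eq]

-- ===== VERDICT (by name: the statement is the Claim_ definition above) =====
theorem possible_protein_spec : Claim_equal_possible_protein := by
  intro ORFlist _
  unfold Spec_possible_protein possible_protein possible_protein_alt
  rw [show pvStepA = pvStepB from funext fun ps => funext fun frame => step_eq ps frame]
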